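-- pv_equiv track=rewrite | github.com/HyewonKkang/algorithm | Programmers/level2/discountEvent.py | solution
-- ===== SOURCE A (Python) =====
-- from collections import Counter
--
-- def solution(want, number, discount):
--     result = 0
--     discountLen = len(discount)
--     products = dict(zip(want, number))
--     for i in range(0, discountLen - 10 + 1):
--         if products == Counter(discount[i : i + 10]):
--             result += 1
--     return result
-- ===== SOURCE B (Python) =====
-- def solution(want, number, discount):
--     products = dict(zip(want, number))
--     n = len(discount)
--     if n < 10:
--         return 0
--     target = len(products)
--     # window counts, pos = #keys with positive count, good = #positive keys matching products
--     window = {}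
--     pos = 0
--     good = 0
--     for x in discount[:10]:
--         c = window.get(x, 0)
--         p = products.get(x)
--         if c == 0:
--             pos += 1
--         elif p == c:
--             good -= 1
--         if p == c + 1:
--             good += 1
--         window[x] = c + 1
--     result = 1 if pos == target and good == pos else 0
--     for i in range(10, n):
--         y = discount[i - 10]
--         c = window[y]
--         p = products.get(y)
--         if c == 1:
--             pos -= 1
--         if p == c:
--             good -= 1
--         if c > 1 and p == c - 1:
--             good += 1
--         window[y] = c - 1
--         x = discount[i]
--         c = window.get(x, 0)
--         p = products.get(x)
--         if c == 0:
--             pos += 1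
--         elif p == c:
--             good -= 1
--         if p == c + 1:
--             good += 1
--         window[x] = c + 1
--         if pos == target and good == pos:
--             result += 1
--     return result
-- ===== Notes on version B (the rewrite author's own statement) =====
-- stated objective: faster
-- what changed: B replaces A's per-window Counter rebuild and dict comparison with a true sliding window: it updates incremental counts for the element leaving and entering plus two running tallies (number of distinct keys in the window, and how many of them match the wanted counts), so each step is O(1) instead of rebuilding and comparing a 10-element Counter.
import Mathlib
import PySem

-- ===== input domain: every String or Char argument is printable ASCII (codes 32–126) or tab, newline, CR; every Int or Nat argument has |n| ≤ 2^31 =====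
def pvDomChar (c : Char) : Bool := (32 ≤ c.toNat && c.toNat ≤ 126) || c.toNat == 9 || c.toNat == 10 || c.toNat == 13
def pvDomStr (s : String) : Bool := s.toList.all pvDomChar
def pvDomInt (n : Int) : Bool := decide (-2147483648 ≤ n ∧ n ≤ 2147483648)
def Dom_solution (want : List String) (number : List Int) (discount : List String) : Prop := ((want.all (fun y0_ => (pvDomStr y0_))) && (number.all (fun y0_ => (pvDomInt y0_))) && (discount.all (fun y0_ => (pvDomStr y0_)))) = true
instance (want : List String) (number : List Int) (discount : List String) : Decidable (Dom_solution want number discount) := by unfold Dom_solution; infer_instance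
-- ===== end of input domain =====

-- B replaces A's per-window Counter rebuild + dict comparison by a sliding window with incremental
-- counts and two running tallies (distinct keys in the window, and how many of them match the
-- wanted counts), updating the state in O(1) per step.

-- ===== PORT A =====
-- Python's `dict == dict` ignores insertion order: compare lookups from both key lists.
def pyDictEqInt (d1 d2 : PySem.Dict String Int) : Bool :=
  d1.keys.all (fun k => d1.get? k == d2.get? k) && d2.keys.all (fun k => d1.get? k == d2.get? k)

def solution (want : List String) (number : List Int) (discount : List String) : Int :=
  let result : Int := 0
  let discountLen : Int := (discount.length : Int)
  let products := PySem.Dict.ofList (want.zip number)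
  (PySem.List.pyRange 0 (discountLen - 10 + 1) 1).foldl
    (fun result i =>
      if pyDictEqInt products (PySem.Dict.counter (PySem.List.slice discount (some i) (some (i + 10)))) then
        result + 1
      else result)
    result

-- ===== PORT B =====
-- one increment step of the window: window[x] += 1, maintaining pos/good
def bumpUp (products w : PySem.Dict String Int) (pos good : Int) (x : String) :
    PySem.Dict String Int × Int × Int :=
  let c := w.getD x 0
  let p := products.get? x
  let pos' := if c == 0 then pos + 1 else pos
  let good' := if !(c == 0) && p == some c then good - 1 else good
  let good'' := if p == some (c + 1) then good' + 1 else good'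
  (w.insert x (c + 1), pos', good'')

-- one decrement step of the window: window[y] -= 1, maintaining pos/good
def bumpDown (products w : PySem.Dict String Int) (pos good : Int) (y : String) :
    PySem.Dict String Int × Int × Int :=
  let c := w.getD y 0   -- window[y]; y is always in the window here (its count is ≥ 1)
  let p := products.get? y
  let pos' := if c == 1 then pos - 1 else pos
  let good' := if p == some c then good - 1 else good
  let good'' := if 1 < c && p == some (c - 1) then good' + 1 else good'
  (w.insert y (c - 1), pos', good'')

-- the body of B's sliding loop (state: window, pos, good, result)
def slideStep (products : PySem.Dict String Int) (discount : List String) (target : Int)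
    (s : PySem.Dict String Int × Int × Int × Int) (i : Int) :
    PySem.Dict String Int × Int × Int × Int :=
  let t1 := bumpDown products s.1 s.2.1 s.2.2.1 (PySem.List.pyGetD discount (i - 10) "")
  let t2 := bumpUp products t1.1 t1.2.1 t1.2.2 (PySem.List.pyGetD discount i "")
  (t2.1, t2.2.1, t2.2.2,
    if t2.2.1 == target && t2.2.2 == t2.2.1 then s.2.2.2 + 1 else s.2.2.2)

def solution_alt (want : List String) (number : List Int) (discount : List String) : Int :=
  let products := PySem.Dict.ofList (want.zip number)
  let n : Int := (discount.length : Int)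
  if n < 10 then 0
  else
    let target : Int := (products.size : Int)
    let s0 := (PySem.List.slice discount none (some 10)).foldl
        (fun s x => bumpUp products s.1 s.2.1 s.2.2 x) (PySem.Dict.empty, 0, 0)
    let result0 : Int := if s0.2.1 == target && s0.2.2 == s0.2.1 then 1 else 0
    let fin := (PySem.List.pyRange 10 n 1).foldl (slideStep products discount target)
        (s0.1, s0.2.1, s0.2.2, result0)
    fin.2.2.2

-- ===== PRECONDITION & SPEC =====
def Spec_solution (want : List String) (number : List Int) (discount : List String) (out : Int) : Prop := out = solution_alt want number discount
instance (want : List String) (number : List Int) (discount : List String) (out : Int) : Decidable (Spec_solution want number discount out) := by unfold Spec_solution; infer_instance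

-- ===== CLAIM (what is proved, stated in full; the proofs are below) =====
def Claim_equal_solution : Prop := ∀ (want : List String) (number : List Int) (discount : List String), Dom_solution want number discount → Spec_solution want number discount (solution want number discount)

-- ===== LEMMAS AND PROOFS =====

-- the invariant tying B's window state to the multiset of window contents C
def WInv (products : PySem.Dict String Int) (C : List String)
    (s : PySem.Dict String Int × Int × Int) : Prop :=
  (∀ k, s.1.getD k 0 = (C.count k : Int)) ∧
  s.2.1 = (C.dedup.length : Int) ∧
  s.2.2 = ((C.dedup.countP (fun k => products.get? k == some ((C.count k : Int)))) : Int)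

theorem pyDictEqInt_iff (d1 d2 : PySem.Dict String Int) :
    pyDictEqInt d1 d2 = true ↔ ∀ k, d1.get? k = d2.get? k := by
  constructor
  · intro h k
    simp only [pyDictEqInt, Bool.and_eq_true, List.all_eq_true, beq_iff_eq] at h
    by_cases h1 : k ∈ d1.keys
    · exact h.1 k h1
    · by_cases h2 : k ∈ d2.keys
      · exact h.2 k h2
      · rw [(PySem.Dict.get?_eq_none_iff_not_mem_keys d1 k).mpr h1,
            (PySem.Dict.get?_eq_none_iff_not_mem_keys d2 k).mpr h2]
  · intro h
    simp only [pyDictEqInt, Bool.and_eq_true, List.all_eq_true, beq_iff_eq]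
    exact ⟨fun k _ => h k, fun k _ => h k⟩

theorem counter_get?_eq (win : List String) (k : String) :
    (PySem.Dict.counter win).get? k
      = if k ∈ win then some ((win.count k : Int)) else none := by
  by_cases h : k ∈ win
  · have hmem : k ∈ (PySem.Dict.counter win).keys := by
      rw [PySem.Dict.keys_counter]; exact (PySem.Set.mem_ofList win k).mpr h
    have hne : (PySem.Dict.counter win).get? k ≠ none := by
      rw [Ne, PySem.Dict.get?_eq_none_iff_not_mem_keys]
      exact fun hno => hno hmem
    obtain ⟨v, hv⟩ := Option.ne_none_iff_exists'.mp hne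
    have hgd := PySem.Dict.getD_counter win k
    rw [PySem.Dict.getD_eq_get?_getD, hv] at hgd
    simp only [Option.getD_some] at hgd
    rw [hv, if_pos h, hgd]
  · rw [if_neg h, PySem.Dict.get?_eq_none_iff_not_mem_keys, PySem.Dict.keys_counter,
        PySem.Set.mem_ofList]
    exact h

-- countP after changing the predicate at exactly one member of a Nodup list
theorem countP_pointwise {α : Type} [DecidableEq α] (l : List α) (hl : l.Nodup) (a : α)
    (ha : a ∈ l) (p q : α → Bool) (h : ∀ b ∈ l, b ≠ a → p b = q b) :
    (l.countP q : Int) = (l.countP p : Int)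
      - (if p a then 1 else 0) + (if q a then 1 else 0) := by
  have hperm := List.perm_cons_erase ha
  have hpq : (l.erase a).countP p = (l.erase a).countP q := by
    apply List.countP_congr
    intro b hb
    have := (List.Nodup.mem_erase_iff hl).mp hb
    rw [h b this.2 this.1]
  have hp : l.countP p = (l.erase a).countP p + (if p a then 1 else 0) := by
    rw [hperm.countP_eq, List.countP_cons]
  have hq : l.countP q = (l.erase a).countP q + (if q a then 1 else 0) := by
    rw [hperm.countP_eq, List.countP_cons]
  rw [hp, hq, hpq]
  by_cases hpa : p a <;> by_cases hqa : q a <;> simp [hpa, hqa]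

theorem WInv_perm (products : PySem.Dict String Int) {C C' : List String}
    (hC : C.Perm C') (s : PySem.Dict String Int × Int × Int)
    (h : WInv products C s) : WInv products C' s := by
  obtain ⟨h1, h2, h3⟩ := h
  refine ⟨fun k => by rw [h1 k, hC.count_eq k], ?_, ?_⟩
  · rw [h2, hC.dedup.length_eq]
  · rw [h3, hC.dedup.countP_eq]
    congr 1
    apply List.countP_congr
    intro b _
    rw [hC.count_eq b]

theorem WInv_up (products : PySem.Dict String Int) (C : List String) (x : String)
    (s : PySem.Dict String Int × Int × Int) (h : WInv products C s) :
    WInv products (x :: C) (bumpUp products s.1 s.2.1 s.2.2 x) := by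
  obtain ⟨h1, h2, h3⟩ := h
  have hc := h1 x
  simp only [WInv, bumpUp, hc]
  have hbeq : ((C.count x : Int) == 0) = decide (x ∉ C) := by
    by_cases hx : x ∈ C
    · simp [hx]
      exact fun h0 => absurd (List.count_eq_zero.mp (by exact_mod_cast h0)) (by simp [hx])
    · simp [hx, List.count_eq_zero.mpr hx]
  refine ⟨?_, ?_, ?_⟩
  · intro k
    rw [PySem.Dict.getD_insert]
    by_cases hk : k = x
    · subst hk; simp [List.count_cons_self]
    · rw [if_neg hk, h1 k]
      have hxk : ¬ x = k := fun he => hk he.symm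
      simp [List.count_cons, hxk]
  · rw [hbeq, h2]
    by_cases hx : x ∈ C
    · simp [hx, List.dedup_cons_of_mem hx]
    · simp [hx, List.dedup_cons_of_notMem hx]
  · rw [hbeq, h3]
    by_cases hx : x ∈ C
    · -- dedup unchanged; the predicate changes only at x
      rw [List.dedup_cons_of_mem hx]
      have hmem : x ∈ C.dedup := List.mem_dedup.mpr hx
      have hupd := countP_pointwise C.dedup C.nodup_dedup x hmem
        (fun k => products.get? k == some ((C.count k : Int)))
        (fun k => products.get? k == some (((x :: C).count k : Int)))
        (fun b _ hb => by
          have hxb : ¬ x = b := fun he => hb he.symm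
          simp [List.count_cons, hxb])
      rw [hupd]
      simp only [hx, decide_false, not_true]
      simp only [List.count_cons_self]
      by_cases hp1 : products.get? x == some ((C.count x : Int)) <;>
        by_cases hp2 : products.get? x == some (((C.count x : Int) + 1)) <;>
          simp_all [Nat.cast_add, Nat.cast_one]
    · rw [List.dedup_cons_of_notMem hx, List.countP_cons]
      have hcnt0 : C.count x = 0 := List.count_eq_zero.mpr hx
      have hcongr : C.dedup.countP (fun k => products.get? k == some (((x :: C).count k : Int)))
          = C.dedup.countP (fun k => products.get? k == some ((C.count k : Int))) := by
        apply List.countP_congr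
        intro b hb
        have hbC : b ∈ C := List.mem_dedup.mp hb
        have hxb : ¬ x = b := fun he => hx (he ▸ hbC)
        simp [List.count_cons, hxb]
      rw [hcongr]
      simp only [hx, not_false_iff, decide_true, Bool.not_true, Bool.false_and,
        List.count_cons_self, hcnt0]
      by_cases hp2 : products.get? x == some ((0 : Int) + 1) <;> simp_all

theorem WInv_down (products : PySem.Dict String Int) (C : List String) (y : String)
    (s : PySem.Dict String Int × Int × Int) (h : WInv products (y :: C) s) :
    WInv products C (bumpDown products s.1 s.2.1 s.2.2 y) := by
  obtain ⟨h1, h2, h3⟩ := h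
  have hc : s.1.getD y 0 = (C.count y : Int) + 1 := by
    rw [h1 y]; simp [List.count_cons_self]
  simp only [WInv, bumpDown, hc]
  have hbeq : (((C.count y : Int) + 1) == 1) = decide (y ∉ C) := by
    by_cases hy : y ∈ C
    · simp [hy, beq_iff_eq]
      intro h0
      exact absurd (List.count_eq_zero.mp (by exact_mod_cast h0)) (by simp [hy])
    · simp [hy, List.count_eq_zero.mpr hy]
  refine ⟨?_, ?_, ?_⟩
  · intro k
    rw [PySem.Dict.getD_insert]
    by_cases hk : k = y
    · subst hk; simp
    · rw [if_neg hk, h1 k]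
      have hyk : ¬ y = k := fun he => hk he.symm
      simp [List.count_cons, hyk]
  · rw [hbeq, h2]
    by_cases hy : y ∈ C
    · simp [hy, List.dedup_cons_of_mem hy]
    · simp [hy, List.dedup_cons_of_notMem hy]
  · rw [h3]
    by_cases hy : y ∈ C
    · rw [List.dedup_cons_of_mem hy]
      have hmem : y ∈ C.dedup := List.mem_dedup.mpr hy
      have hupd := countP_pointwise C.dedup C.nodup_dedup y hmem
        (fun k => products.get? k == some (((y :: C).count k : Int)))
        (fun k => products.get? k == some ((C.count k : Int)))
        (fun b _ hb => by
          have hyb : ¬ y = b := fun he => hb he.symm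
          simp [List.count_cons, hyb])
      rw [hupd]
      have hcpos : 0 < C.count y := List.count_pos_iff.mpr hy
      have hgt : (1 < (C.count y : Int) + 1) = True := by simp; omega
      simp only [List.count_cons_self, hgt, decide_true, Bool.true_and,
        Nat.cast_add, Nat.cast_one, Int.add_sub_cancel]
      by_cases hp1 : products.get? y == some ((C.count y : Int) + 1) <;>
        by_cases hp2 : products.get? y == some ((C.count y : Int)) <;>
          simp_all
    · rw [List.dedup_cons_of_notMem hy, List.countP_cons]
      have hcnt0 : C.count y = 0 := List.count_eq_zero.mpr hy
      have hcongr : C.dedup.countP (fun k => products.get? k == some (((y :: C).count k : Int)))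
          = C.dedup.countP (fun k => products.get? k == some ((C.count k : Int))) := by
        apply List.countP_congr
        intro b hb
        have hbC : b ∈ C := List.mem_dedup.mp hb
        have hyb : ¬ y = b := fun he => hy (he ▸ hbC)
        simp [List.count_cons, hyb]
      rw [hcongr]
      have hgt : (1 < (C.count y : Int) + 1) = False := by simp [hcnt0]
      simp only [List.count_cons_self, hcnt0, hgt, decide_false, Bool.false_and,
        Nat.cast_zero, zero_add]
      by_cases hp1 : products.get? y == some (1 : Int) <;> simp_all

theorem WInv_foldl (products : PySem.Dict String Int) (L : List String) :
    ∀ (C : List String) (s : PySem.Dict String Int × Int × Int), WInv products C s →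
    WInv products (L.reverse ++ C)
      (L.foldl (fun s x => bumpUp products s.1 s.2.1 s.2.2 x) s) := by
  induction L with
  | nil => intro C s h; simpa using h
  | cons x L ih =>
    intro C s h
    have := ih (x :: C) _ (WInv_up products C x s h)
    simpa [List.append_assoc] using this

-- B's window test equals Python's dict == Counter test
theorem match_eq (products : PySem.Dict String Int) (hnd : products.keys.Nodup)
    (C : List String) (s : PySem.Dict String Int × Int × Int) (h : WInv products C s) :
    ((s.2.1 == (products.size : Int)) && (s.2.2 == s.2.1))
      = pyDictEqInt products (PySem.Dict.counter C) := by
  obtain ⟨h1, h2, h3⟩ := h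
  have hsize : products.size = products.keys.length := by
    simp [PySem.Dict.size, PySem.Dict.keys]
  rw [h2, h3, hsize]
  have hpred : ∀ k ∈ C.dedup, (products.get? k == some ((C.count k : Int))) = true →
      k ∈ products.keys := by
    intro k _ hk
    rw [beq_iff_eq] at hk
    by_contra hno
    rw [(PySem.Dict.get?_eq_none_iff_not_mem_keys products k).mpr hno] at hk
    simp at hk
  by_cases hb : pyDictEqInt products (PySem.Dict.counter C) = true
  · rw [hb]
    have hpt := (pyDictEqInt_iff _ _).mp hb
    have hall : ∀ k ∈ C.dedup, (products.get? k == some ((C.count k : Int))) = true := by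
      intro k hk
      have hkC : k ∈ C := List.mem_dedup.mp hk
      rw [beq_iff_eq, hpt k, counter_get?_eq, if_pos hkC]
    have hcp : C.dedup.countP (fun k => products.get? k == some ((C.count k : Int)))
        = C.dedup.length := List.countP_eq_length.mpr hall
    have hsets : ∀ k, k ∈ products.keys ↔ k ∈ C.dedup := by
      intro k
      rw [List.mem_dedup]
      constructor
      · intro hk
        by_contra hkC
        have := hpt k
        rw [counter_get?_eq, if_neg hkC, PySem.Dict.get?_eq_none_iff_not_mem_keys] at this
        exact this hk
      · intro hkC
        exact hpred k (List.mem_dedup.mpr hkC)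
          (by rw [beq_iff_eq, hpt k, counter_get?_eq, if_pos hkC])
    have hperm : products.keys.Perm C.dedup :=
      (List.perm_ext_iff_of_nodup hnd C.nodup_dedup).mpr hsets
    rw [hcp, hperm.length_eq]
    simp
  · rw [Bool.eq_false_iff.mpr hb, Bool.eq_false_iff]
    intro hcon
    rw [Bool.and_eq_true, beq_iff_eq, beq_iff_eq] at hcon
    obtain ⟨hlen, hcnt⟩ := hcon
    have hlenN : C.dedup.length = products.keys.length := by exact_mod_cast hlen
    have hcntN : C.dedup.countP (fun k => products.get? k == some ((C.count k : Int)))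
        = C.dedup.length := by exact_mod_cast hcnt
    have hall := List.countP_eq_length.mp hcntN
    have hsub : C.dedup ⊆ products.keys := fun k hk => hpred k hk (hall k hk)
    have hperm : C.dedup.Perm products.keys := by
      apply (List.subperm_of_subset C.nodup_dedup hsub).perm_of_length_le
      omega
    apply hb
    rw [pyDictEqInt_iff]
    intro k
    rw [counter_get?_eq]
    by_cases hkC : k ∈ C
    · rw [if_pos hkC]
      have := hall k (List.mem_dedup.mpr hkC)
      rwa [beq_iff_eq] at this
    · rw [if_neg hkC, PySem.Dict.get?_eq_none_iff_not_mem_keys]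
      intro hk
      exact hkC (List.mem_dedup.mp (hperm.mem_iff.mpr hk))

theorem slice_cons_getD (xs : List String) (a b : Int) (h0 : 0 ≤ a) (hab : a < b)
    (hlen : a < (xs.length : Int)) :
    PySem.List.slice xs (some a) (some b)
      = PySem.List.pyGetD xs a "" :: PySem.List.slice xs (some (a + 1)) (some b) := by
  rw [PySem.List.slice_toNat xs h0 (by omega), PySem.List.slice_toNat xs (by omega) (by omega),
      PySem.List.pyGetD_of_nonneg xs "" h0]
  have hna : a.toNat < xs.length := by omega
  have h1 : (a + 1).toNat = a.toNat + 1 := by omega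
  have h2 : b.toNat - a.toNat = (b.toNat - (a + 1).toNat) + 1 := by omega
  rw [List.drop_eq_getElem_cons hna, h2, List.take_succ_cons, List.getD_eq_getElem xs "" hna, h1]

theorem slice_snoc_getD (xs : List String) (a b : Int) (h0 : 0 ≤ a) (hab : a ≤ b)
    (hb : b < (xs.length : Int)) :
    PySem.List.slice xs (some a) (some (b + 1))
      = PySem.List.slice xs (some a) (some b) ++ [PySem.List.pyGetD xs b ""] := by
  rw [PySem.List.slice_toNat xs h0 (by omega), PySem.List.slice_toNat xs h0 (by omega),
      PySem.List.pyGetD_of_nonneg xs "" (by omega)]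
  have hnb : b.toNat < xs.length := by omega
  have h1 : (b + 1).toNat - a.toNat = (b.toNat - a.toNat) + 1 := by omega
  rw [h1, List.take_add_one]
  congr 1
  have hlt : b.toNat - a.toNat < (xs.drop a.toNat).length := by
    rw [List.length_drop]; omega
  rw [List.getElem?_eq_getElem hlt, List.getElem_drop]
  have : a.toNat + (b.toNat - a.toNat) = b.toNat := by omega
  simp only [this]
  rw [List.getD_eq_getElem xs "" hnb]
  rfl

theorem slide (products : PySem.Dict String Int) (hnd : products.keys.Nodup)
    (discount : List String) :
    ∀ (m : Nat) (j : Int) (w : PySem.Dict String Int) (pos good r : Int),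
    10 ≤ j → j + m = (discount.length : Int) →
    WInv products (PySem.List.slice discount (some (j - 10)) (some j)) (w, pos, good) →
    ((PySem.List.pyRange j (discount.length : Int) 1).foldl
        (slideStep products discount (products.size : Int)) (w, pos, good, r)).2.2.2
      = r + ((PySem.List.pyRange (j - 9) ((discount.length : Int) - 9) 1).countP
            (fun i => pyDictEqInt products
              (PySem.Dict.counter (PySem.List.slice discount (some i) (some (i + 10))))) : Int) := by
  intro m
  induction m with
  | zero =>
    intro j w pos good r hj hval _
    rw [PySem.List.pyRange_one_eq_nil (by omega), PySem.List.pyRange_one_eq_nil (by omega)]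
    simp
  | succ m ih =>
    intro j w pos good r hj hval hinv
    have hjlt : j < (discount.length : Int) := by omega
    rw [PySem.List.pyRange_one_cons hjlt]
    simp only [List.foldl_cons]
    have hsl : PySem.List.slice discount (some (j - 10)) (some j)
        = PySem.List.pyGetD discount (j - 10) ""
            :: PySem.List.slice discount (some (j - 9)) (some j) := by
      have h := slice_cons_getD discount (j - 10) j (by omega) (by omega) (by omega)
      have e : j - 10 + 1 = j - 9 := by ring
      rw [h, e]
    rw [hsl] at hinv
    have hdown := WInv_down products _ _ (w, pos, good) hinv
    have hup := WInv_up products _ (PySem.List.pyGetD discount j "") _ hdown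
    have hsnoc : PySem.List.slice discount (some (j - 9)) (some (j + 1))
        = PySem.List.slice discount (some (j - 9)) (some j)
            ++ [PySem.List.pyGetD discount j ""] :=
      slice_snoc_getD discount (j - 9) j (by omega) (by omega) (by omega)
    have hperm : (PySem.List.pyGetD discount j ""
          :: PySem.List.slice discount (some (j - 9)) (some j)).Perm
        (PySem.List.slice discount (some (j - 9)) (some (j + 1))) := by
      rw [hsnoc]
      exact (List.perm_append_singleton _ _).symm
    have hinv' := WInv_perm products hperm _ hup
    have hmatch := match_eq products hnd _ _ hinv'
    -- evaluate one slideStep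
    set t1 := bumpDown products w pos good (PySem.List.pyGetD discount (j - 10) "") with ht1
    set t2 := bumpUp products t1.1 t1.2.1 t1.2.2 (PySem.List.pyGetD discount j "") with ht2
    have hstep : slideStep products discount (products.size : Int) (w, pos, good, r) j
        = (t2.1, t2.2.1, t2.2.2,
            if t2.2.1 == (products.size : Int) && t2.2.2 == t2.2.1 then r + 1 else r) := rfl
    rw [hstep]
    have hik := ih (j + 1) t2.1 t2.2.1 t2.2.2
      (if t2.2.1 == (products.size : Int) && t2.2.2 == t2.2.1 then r + 1 else r)
      (by omega) (by omega)
      (by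
        have : j + 1 - 10 = j - 9 := by ring
        rw [this]
        exact hinv')
    rw [hik]
    have hcons : PySem.List.pyRange (j - 9) ((discount.length : Int) - 9) 1
        = (j - 9) :: PySem.List.pyRange (j - 9 + 1) ((discount.length : Int) - 9) 1 :=
      PySem.List.pyRange_one_cons (by omega)
    rw [hcons, List.countP_cons]
    have h10 : j - 9 + 10 = j + 1 := by ring
    have hj1 : j + 1 - 9 = j - 9 + 1 := by ring
    rw [hj1]
    simp only [h10]
    rw [← hmatch]
    by_cases hcond : (t2.2.1 == ((products.size : Nat) : Int) && t2.2.2 == t2.2.1) = true <;>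
      simp [hcond] <;> push_cast <;> ring

-- ===== VERDICT (by name: the statement is the Claim_ definition above) =====
theorem solution_spec : Claim_equal_solution := by
  unfold Claim_equal_solution
  intro want number discount _
  unfold Spec_solution solution solution_alt
  simp only []
  set products := PySem.Dict.ofList (want.zip number) with hp
  have hnd : products.keys.Nodup := PySem.Dict.nodup_keys_ofList _
  set n : Int := (discount.length : Int) with hn
  have hA : (PySem.List.pyRange 0 (n - 10 + 1) 1).foldl
      (fun result i =>
        if pyDictEqInt products (PySem.Dict.counter
            (PySem.List.slice discount (some i) (some (i + 10)))) then result + 1 else result)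
      0
      = 0 + (((PySem.List.pyRange 0 (n - 10 + 1) 1).countP
          (fun i => pyDictEqInt products (PySem.Dict.counter
            (PySem.List.slice discount (some i) (some (i + 10)))))) : Int) :=
    PySem.List.foldl_if_add_one _ _ 0
  rw [hA]
  by_cases hlt : n < 10
  · rw [if_pos hlt, PySem.List.pyRange_one_eq_nil (by omega)]
    simp
  · rw [if_neg hlt]
    have hslice0 : PySem.List.slice discount none (some 10)
        = PySem.List.slice discount (some 0) (some 10) := by
      rw [PySem.List.slice_to discount (b := 10) (by norm_num), PySem.List.slice_toNat discount (by norm_num) (by norm_num)]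
      simp
    have hinv0 : WInv products ([] : List String)
        ((PySem.Dict.empty : PySem.Dict String Int), (0 : Int), (0 : Int)) := by
      refine ⟨fun k => by simp [PySem.Dict.getD_empty], by simp, by simp⟩
    have hfold := WInv_foldl products (PySem.List.slice discount none (some 10)) [] _ hinv0
    rw [List.append_nil] at hfold
    have hinvW : WInv products (PySem.List.slice discount (some 0) (some 10))
        ((PySem.List.slice discount none (some 10)).foldl
          (fun s x => bumpUp products s.1 s.2.1 s.2.2 x)
          ((PySem.Dict.empty : PySem.Dict String Int), (0 : Int), (0 : Int))) := by
      have hpm : (PySem.List.slice discount none (some 10)).reverse.Perm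
          (PySem.List.slice discount (some 0) (some 10)) := by
        rw [← hslice0]
        exact List.reverse_perm _
      exact WInv_perm products hpm _ hfold
    set s0 := (PySem.List.slice discount none (some 10)).foldl
        (fun s x => bumpUp products s.1 s.2.1 s.2.2 x)
        ((PySem.Dict.empty : PySem.Dict String Int), (0 : Int), (0 : Int)) with hs0
    have hmatch0 := match_eq products hnd _ _ hinvW
    have hslide := slide products hnd discount (n - 10).toNat 10 s0.1 s0.2.1 s0.2.2
      (if s0.2.1 == ((products.size : Nat) : Int) && s0.2.2 == s0.2.1 then 1 else 0)
      (by omega) (by omega)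
      (by
        have hse : (s0.1, s0.2.1, s0.2.2) = s0 := rfl
        have e10 : (10 : Int) - 10 = 0 := by norm_num
        rw [hse, e10]
        exact hinvW)
    rw [hslide]
    have hcons : PySem.List.pyRange 0 (n - 10 + 1) 1
        = 0 :: PySem.List.pyRange 1 (n - 10 + 1) 1 :=
      PySem.List.pyRange_one_cons (by omega)
    rw [hcons, List.countP_cons]
    have h1 : (10 : Int) - 9 = 1 := by norm_num
    have h2 : n - 9 = n - 10 + 1 := by ring
    rw [h1, h2]
    have h010 : (0 : Int) + 10 = 10 := by norm_num
    simp only [h010]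
    rw [← hmatch0]
    by_cases hcond : (s0.2.1 == ((products.size : Nat) : Int) && s0.2.2 == s0.2.1) = true <;>
      simp [hcond] <;> push_cast <;> ring
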